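-- pv_equiv track=rewrite | github.com/olivierjuanedf/eurec-2026-vahidemad | utils/basic_utils.py | are_lists_eq
-- ===== SOURCE A (Python) =====
-- from typing import List, Optional, Tuple, Union, Dict
--
-- def are_lists_eq(list_of_lists: List[list]) -> bool:
--     first_list = list_of_lists[0]
--     len_first_list = len(first_list)
--     set_first_list = set(first_list)
--     n_lists = len(list_of_lists)
--     for i_list in range(1, n_lists):
--         current_list = list_of_lists[i_list]
--         if not (len(current_list) == len_first_list and set(current_list) == set_first_list):
--             return False
--     return True
-- ===== SOURCE B (Python) =====
-- def are_lists_eq(list_of_lists):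
--     first = list_of_lists[0]
--     lo = hi = len(first)
--     union = set(first)
--     inter = set(first)
--     for l in list_of_lists[1:]:
--         n = len(l)
--         lo = min(lo, n)
--         hi = max(hi, n)
--         s = set(l)
--         union = union | s
--         inter = inter & s
--     return lo == hi and union == inter
-- ===== Notes on version B (the rewrite author's own statement) =====
-- stated objective: alternative
-- what changed: Replaces A's compare-every-list-to-the-first scan by a single aggregation pass maintaining min/max of the lengths and the running union and intersection of the element-sets, returning min==max and union==inter (all lists equal as sets with equal lengths iff these aggregates collapse).
import Mathlib
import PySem

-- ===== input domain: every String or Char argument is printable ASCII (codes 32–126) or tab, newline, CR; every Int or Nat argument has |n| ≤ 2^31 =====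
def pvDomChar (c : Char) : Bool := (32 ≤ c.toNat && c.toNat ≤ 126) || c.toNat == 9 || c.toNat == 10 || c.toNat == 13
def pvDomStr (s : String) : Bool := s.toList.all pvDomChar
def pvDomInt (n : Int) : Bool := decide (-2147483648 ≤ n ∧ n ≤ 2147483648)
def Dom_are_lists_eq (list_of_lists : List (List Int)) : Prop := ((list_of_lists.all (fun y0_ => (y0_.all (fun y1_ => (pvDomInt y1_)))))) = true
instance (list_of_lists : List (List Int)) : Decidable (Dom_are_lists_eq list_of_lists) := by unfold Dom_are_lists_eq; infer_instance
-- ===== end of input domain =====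

-- B replaces A's compare-each-list-to-the-first scan by one aggregation pass maintaining
-- min/max of the lengths and the running union and intersection of the element-sets, then
-- returns min == max and union == inter (alternative decomposition, same cost).
-- ===== PORT A =====
def are_lists_eq (list_of_lists : List (List Int)) : Bool :=
  match PySem.List.pyGet? list_of_lists 0 with
  | none => false  -- Python raises IndexError here; excluded by Pre_
  | some first_list =>
    let len_first_list := first_list.length
    let set_first_list : PySem.Set Int := PySem.Set.ofList first_list
    (PySem.List.pyRange 1 (list_of_lists.length : Int) 1).all (fun i_list =>
      let current_list := PySem.List.pyGetD list_of_lists i_list []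
      decide (current_list.length = len_first_list) &&
        PySem.Set.equal (PySem.Set.ofList current_list) set_first_list)

-- ===== PORT B =====
-- the loop body: state is (lo, hi, union, inter)
def pvStep (acc : Int × Int × PySem.Set Int × PySem.Set Int) (l : List Int) :
    Int × Int × PySem.Set Int × PySem.Set Int :=
  let n : Int := (l.length : Int)
  let s : PySem.Set Int := PySem.Set.ofList l
  (min acc.1 n, max acc.2.1 n, PySem.Set.union acc.2.2.1 s, PySem.Set.inter acc.2.2.2 s)

def are_lists_eq_alt (list_of_lists : List (List Int)) : Bool :=
  match PySem.List.pyGet? list_of_lists 0 with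
  | none => false  -- list_of_lists[0] raises IndexError here; excluded by Pre_
  | some first =>
    let s0 : PySem.Set Int := PySem.Set.ofList first
    let st := (PySem.List.slice list_of_lists (some 1) none).foldl pvStep
      ((first.length : Int), (first.length : Int), s0, s0)
    st.1 == st.2.1 && PySem.Set.equal st.2.2.1 st.2.2.2

-- ===== PRECONDITION & SPEC =====
-- Pre_ excludes only the empty list, on which A raises IndexError (so does B).
def Pre_are_lists_eq (list_of_lists : List (List Int)) : Prop := list_of_lists ≠ []
instance (list_of_lists : List (List Int)) : Decidable (Pre_are_lists_eq list_of_lists) := by unfold Pre_are_lists_eq; infer_instance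
def pvWitness_are_lists_eq : List (List Int) := [[1, 2], [2, 1, 1]]

def Spec_are_lists_eq (list_of_lists : List (List Int)) (out : Bool) : Prop := out = are_lists_eq_alt list_of_lists
instance (list_of_lists : List (List Int)) (out : Bool) : Decidable (Spec_are_lists_eq list_of_lists out) := by unfold Spec_are_lists_eq; infer_instance

-- ===== CLAIM (what is proved, stated in full; the proofs are below) =====
def Claim_equal_are_lists_eq : Prop := ∀ (list_of_lists : List (List Int)), Dom_are_lists_eq list_of_lists → Pre_are_lists_eq list_of_lists → Spec_are_lists_eq list_of_lists (are_lists_eq list_of_lists)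

-- ===== LEMMAS AND PROOFS =====

-- the per-list condition A tests, as a proposition
def pvSame (first l : List Int) : Prop :=
  l.length = first.length ∧ ∀ x : Int, x ∈ l ↔ x ∈ first

-- A returns true iff every later list shares the first's length and members
theorem are_lists_eq_iff (first : List Int) (rest : List (List Int)) :
    are_lists_eq (first :: rest) = true ↔ ∀ l ∈ rest, pvSame first l := by
  unfold are_lists_eq
  rw [PySem.List.pyGet?_zero_cons]
  dsimp only
  have hmap : (PySem.List.pyRange 1 (((first :: rest).length : Nat) : Int) 1).map
      (fun i => PySem.List.pyGetD (first :: rest) i ([] : List Int)) = rest := by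
    simpa using PySem.List.map_pyGetD_pyRange' (xs := first :: rest) (a := 1)
      (d := ([] : List Int)) (by norm_num)
  rw [show (PySem.List.pyRange 1 ((first :: rest).length : Int) 1).all
        (fun i_list =>
          decide ((PySem.List.pyGetD (first :: rest) i_list []).length = first.length) &&
            PySem.Set.equal (PySem.Set.ofList (PySem.List.pyGetD (first :: rest) i_list []))
              (PySem.Set.ofList first))
      = rest.all (fun l => decide (l.length = first.length) &&
            PySem.Set.equal (PySem.Set.ofList l) (PySem.Set.ofList first)) by
    conv_rhs => rw [← hmap, List.all_map]
    rfl]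
  simp only [List.all_eq_true, Bool.and_eq_true, decide_eq_true_eq, PySem.Set.equal_iff,
    PySem.Set.mem_ofList, pvSame]

-- projections of the fold
theorem fold_fst (rest : List (List Int)) (acc : Int × Int × PySem.Set Int × PySem.Set Int) :
    (rest.foldl pvStep acc).1 = rest.foldl (fun a l => min a (l.length : Int)) acc.1 := by
  induction rest generalizing acc with
  | nil => rfl
  | cons a t ih => simp [List.foldl_cons, ih, pvStep]

theorem fold_snd (rest : List (List Int)) (acc : Int × Int × PySem.Set Int × PySem.Set Int) :
    (rest.foldl pvStep acc).2.1 = rest.foldl (fun a l => max a (l.length : Int)) acc.2.1 := by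
  induction rest generalizing acc with
  | nil => rfl
  | cons a t ih => simp [List.foldl_cons, ih, pvStep]

theorem mem_fold_union (rest : List (List Int)) (acc : Int × Int × PySem.Set Int × PySem.Set Int)
    (x : Int) : x ∈ (rest.foldl pvStep acc).2.2.1 ↔ x ∈ acc.2.2.1 ∨ ∃ l ∈ rest, x ∈ l := by
  induction rest generalizing acc with
  | nil => simp
  | cons a t ih =>
    simp only [List.foldl_cons, ih, pvStep, PySem.Set.mem_union, PySem.Set.mem_ofList,
      List.mem_cons]
    constructor
    · rintro ((h | h) | ⟨l, hl, hx⟩)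
      · exact Or.inl h
      · exact Or.inr ⟨a, Or.inl rfl, h⟩
      · exact Or.inr ⟨l, Or.inr hl, hx⟩
    · rintro (h | ⟨l, (rfl | hl), hx⟩)
      · exact Or.inl (Or.inl h)
      · exact Or.inl (Or.inr hx)
      · exact Or.inr ⟨l, hl, hx⟩

theorem mem_fold_inter (rest : List (List Int)) (acc : Int × Int × PySem.Set Int × PySem.Set Int)
    (x : Int) : x ∈ (rest.foldl pvStep acc).2.2.2 ↔ x ∈ acc.2.2.2 ∧ ∀ l ∈ rest, x ∈ l := by
  induction rest generalizing acc with
  | nil => simp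
  | cons a t ih =>
    simp only [List.foldl_cons, ih, pvStep, PySem.Set.mem_inter, PySem.Set.mem_ofList,
      List.mem_cons]
    constructor
    · rintro ⟨⟨hacc, ha⟩, hall⟩
      exact ⟨hacc, fun l hl => hl.elim (fun h => h ▸ ha) (hall l)⟩
    · rintro ⟨hacc, hall⟩
      exact ⟨⟨hacc, hall a (Or.inl rfl)⟩, fun l hl => hall l (Or.inr hl)⟩

-- foldl min / max bounds and exactness
theorem foldl_min_le_init (rest : List (List Int)) (a : Int) :
    rest.foldl (fun a l => min a (l.length : Int)) a ≤ a := by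
  induction rest generalizing a with
  | nil => exact le_refl a
  | cons b t ih => exact le_trans (ih _) (min_le_left _ _)

theorem foldl_min_le_mem (rest : List (List Int)) (a : Int) (l : List Int) (hl : l ∈ rest) :
    rest.foldl (fun a l => min a (l.length : Int)) a ≤ (l.length : Int) := by
  induction rest generalizing a with
  | nil => cases hl
  | cons b t ih =>
    rcases List.mem_cons.mp hl with rfl | hl
    · exact le_trans (foldl_min_le_init t _) (min_le_right _ _)
    · exact ih _ hl

theorem init_le_foldl_max (rest : List (List Int)) (a : Int) :
    a ≤ rest.foldl (fun a l => max a (l.length : Int)) a := by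
  induction rest generalizing a with
  | nil => exact le_refl a
  | cons b t ih => exact le_trans (le_max_left _ _) (ih _)

theorem mem_le_foldl_max (rest : List (List Int)) (a : Int) (l : List Int) (hl : l ∈ rest) :
    (l.length : Int) ≤ rest.foldl (fun a l => max a (l.length : Int)) a := by
  induction rest generalizing a with
  | nil => cases hl
  | cons b t ih =>
    rcases List.mem_cons.mp hl with rfl | hl
    · exact le_trans (le_max_right _ _) (init_le_foldl_max t _)
    · exact ih _ hl

theorem foldl_min_of_all_eq (rest : List (List Int)) (a : Int)
    (h : ∀ l ∈ rest, (l.length : Int) = a) :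
    rest.foldl (fun a l => min a (l.length : Int)) a = a := by
  induction rest with
  | nil => rfl
  | cons b t ih =>
    have hb := h b (List.mem_cons_self)
    simp only [List.foldl_cons, hb, min_self]
    exact ih (fun l hl => h l (List.mem_cons_of_mem _ hl))

theorem foldl_max_of_all_eq (rest : List (List Int)) (a : Int)
    (h : ∀ l ∈ rest, (l.length : Int) = a) :
    rest.foldl (fun a l => max a (l.length : Int)) a = a := by
  induction rest with
  | nil => rfl
  | cons b t ih =>
    have hb := h b (List.mem_cons_self)
    simp only [List.foldl_cons, hb, max_self]
    exact ih (fun l hl => h l (List.mem_cons_of_mem _ hl))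

-- B returns true iff every later list shares the first's length and members
theorem are_lists_eq_alt_iff (first : List Int) (rest : List (List Int)) :
    are_lists_eq_alt (first :: rest) = true ↔ ∀ l ∈ rest, pvSame first l := by
  unfold are_lists_eq_alt
  rw [PySem.List.pyGet?_zero_cons, PySem.List.slice_from_one]
  simp only [List.tail_cons, Bool.and_eq_true, beq_iff_eq, PySem.Set.equal_iff,
    fold_fst, fold_snd, mem_fold_union, mem_fold_inter, PySem.Set.mem_ofList]
  constructor
  · rintro ⟨hminmax, hsets⟩ l hl
    refine ⟨?_, fun x => ?_⟩
    · have h1 := foldl_min_le_mem rest (first.length : Int) l hl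
      have h2 := mem_le_foldl_max rest (first.length : Int) l hl
      have h3 := foldl_min_le_init rest (first.length : Int)
      have h4 := init_le_foldl_max rest (first.length : Int)
      omega
    · constructor
      · intro hx
        exact ((hsets x).mp (Or.inr ⟨l, hl, hx⟩)).1
      · intro hx
        exact ((hsets x).mp (Or.inl hx)).2 l hl
  · intro h
    have hlen : ∀ l ∈ rest, (l.length : Int) = (first.length : Int) := by
      intro l hl; exact_mod_cast (h l hl).1
    refine ⟨?_, fun x => ?_⟩
    · rw [foldl_min_of_all_eq rest _ hlen, foldl_max_of_all_eq rest _ hlen]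
    · constructor
      · rintro (hx | ⟨l, hl, hx⟩)
        · exact ⟨hx, fun l hl => ((h l hl).2 x).mpr hx⟩
        · have hx' := ((h l hl).2 x).mp hx
          exact ⟨hx', fun l' hl' => ((h l' hl').2 x).mpr hx'⟩
      · rintro ⟨hx, _⟩
        exact Or.inl hx

-- ===== VERDICT (by name: the statement is the Claim_ definition above) =====
theorem are_lists_eq_spec : Claim_equal_are_lists_eq := by
  intro list_of_lists _ hpre
  unfold Spec_are_lists_eq
  rcases List.exists_cons_of_ne_nil hpre with ⟨first, rest, rfl⟩
  have hA := are_lists_eq_iff first rest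
  have hB := are_lists_eq_alt_iff first rest
  cases hb : are_lists_eq_alt (first :: rest) with
  | true => exact hA.mpr (hB.mp hb)
  | false =>
    cases ha : are_lists_eq (first :: rest) with
    | true => exact absurd (hB.mpr (hA.mp ha)) (by simp [hb])
    | false => rfl
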